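-- pv_equiv track=rewrite | github.com/liuqiyucn/170N | project0/python_problem_set.py | count_combination
-- ===== SOURCE A (Python) =====
-- from math import factorial
--
-- def count_occurence(dice_combo):
--     # count the occurence of each entry in the configuration
--     occurence = {}
--     for dice_value in dice_combo:
--         if dice_value in occurence:
--             occurence[dice_value] = occurence[dice_value] + 1
--         else:
--             occurence[dice_value] = 1
--     return occurence
--
-- def count_combination(dice_side, total_dice_num, dice_combo):
--     # check if the combo list is valid
--     for dice in dice_combo:
--         if dice > dice_side:
--             raise Exception('Dice input larger than maximum side')
--         elif dice < 0:
--             raise Exception('Dice input lower than minumum side')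
--
--     # use multinomial coefficient formula to calculate the combination
--     occurence = count_occurence(dice_combo)
--     denominator = 1
--     numerator = factorial(total_dice_num)
--
--     for key, value in occurence.items():
--         denominator = denominator * factorial(value)
--
--     return numerator // denominator
-- ===== SOURCE B (Python) =====
-- from math import factorial
--
-- def count_combination(dice_side, total_dice_num, dice_combo):
--     # check if the combo list is valid
--     for dice in dice_combo:
--         if dice > dice_side:
--             raise Exception('Dice input larger than maximum side')
--         elif dice < 0:
--             raise Exception('Dice input lower than minumum side')
--
--     # multinomial denominator without a counting dict: the product over i of
--     # (number of occurrences of dice_combo[i] among the first i+1 entries)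
--     # equals the product of factorial(multiplicity) over the distinct values.
--     denominator = 1
--     seen = []
--     for dice in dice_combo:
--         seen.append(dice)
--         denominator *= seen.count(dice)
--     return factorial(total_dice_num) // denominator
-- ===== Notes on version B (the rewrite author's own statement) =====
-- stated objective: simpler
-- what changed: Replaces the occurrence dict and the product of factorials of the counts by a single running product of prefix occurrence counts (denominator = prod over i of #occurrences of dice_combo[i] in dice_combo[:i+1]), using the identity that this telescoping product equals the product of the multiplicities' factorials; the dict helper disappears.
import Mathlib
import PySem

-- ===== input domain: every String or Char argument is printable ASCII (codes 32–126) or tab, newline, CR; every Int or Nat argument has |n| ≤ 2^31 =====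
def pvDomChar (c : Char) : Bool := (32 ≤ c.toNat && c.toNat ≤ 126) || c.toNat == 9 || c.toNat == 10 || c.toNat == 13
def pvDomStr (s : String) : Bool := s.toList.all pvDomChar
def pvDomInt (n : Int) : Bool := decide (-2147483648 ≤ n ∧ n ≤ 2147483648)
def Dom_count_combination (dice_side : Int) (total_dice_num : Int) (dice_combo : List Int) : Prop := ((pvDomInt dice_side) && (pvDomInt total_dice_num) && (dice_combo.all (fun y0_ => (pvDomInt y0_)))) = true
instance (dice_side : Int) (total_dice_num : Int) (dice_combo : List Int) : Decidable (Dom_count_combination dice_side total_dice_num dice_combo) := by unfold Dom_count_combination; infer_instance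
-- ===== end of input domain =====

-- B drops the occurrence dict: the multinomial denominator is computed as the running
-- product of prefix occurrence counts (same value by a telescoping-factorial identity);
-- objective: simpler (no dict helper). Equivalence is about the return value.

-- math.factorial (Pre_ keeps the argument ≥ 0, where Python returns)
def pyFactorial (n : Int) : Int := (Nat.factorial n.toNat : Int)

-- ===== PORT A =====
def count_occurence (dice_combo : List Int) : PySem.Dict Int Int :=
  dice_combo.foldl (fun occurence dice_value =>
    match occurence.get? dice_value with
    | some c => occurence.insert dice_value (c + 1)
    | none   => occurence.insert dice_value 1) PySem.Dict.empty

def count_combination (dice_side : Int) (total_dice_num : Int) (dice_combo : List Int) : Int :=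
  -- the validation loop raises on any die > dice_side or < 0 (excluded by Pre_; 0 stands for the raise)
  if dice_combo.any (fun dice => decide (dice_side < dice) || decide (dice < 0)) then 0
  else
    let occurence := count_occurence dice_combo
    let numerator := pyFactorial total_dice_num
    let denominator := occurence.items.foldl (fun den kv => den * pyFactorial kv.2) 1
    PySem.Int.floordiv numerator denominator

-- ===== PORT B =====
def count_combination_alt (dice_side : Int) (total_dice_num : Int) (dice_combo : List Int) : Int :=
  if dice_combo.any (fun dice => decide (dice_side < dice) || decide (dice < 0)) then 0
  else
    let st := dice_combo.foldl (fun (st : List Int × Int) dice =>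
      let seen := st.1 ++ [dice]
      (seen, st.2 * ((seen.count dice : Nat) : Int))) (([] : List Int), (1 : Int))
    PySem.Int.floordiv (pyFactorial total_dice_num) st.2

-- ===== PRECONDITION & SPEC =====
-- Pre_ excludes exactly the raising inputs: a die above dice_side or below 0 (the explicit
-- raises) and a negative total_dice_num (math.factorial raises ValueError).
def Pre_count_combination (dice_side : Int) (total_dice_num : Int) (dice_combo : List Int) : Prop :=
  0 ≤ total_dice_num ∧ ∀ d ∈ dice_combo, 0 ≤ d ∧ d ≤ dice_side

instance (dice_side : Int) (total_dice_num : Int) (dice_combo : List Int) : Decidable (Pre_count_combination dice_side total_dice_num dice_combo) := by unfold Pre_count_combination; infer_instance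

def pvWitness_count_combination : Int × Int × List Int := (6, 3, [1, 2, 2])

def Spec_count_combination (dice_side : Int) (total_dice_num : Int) (dice_combo : List Int) (out : Int) : Prop := out = count_combination_alt dice_side total_dice_num dice_combo
instance (dice_side : Int) (total_dice_num : Int) (dice_combo : List Int) (out : Int) : Decidable (Spec_count_combination dice_side total_dice_num dice_combo out) := by unfold Spec_count_combination; infer_instance

-- ===== CLAIM (what is proved, stated in full; the proofs are below) =====
def Claim_equal_count_combination : Prop := ∀ (dice_side : Int) (total_dice_num : Int) (dice_combo : List Int), Dom_count_combination dice_side total_dice_num dice_combo → Pre_count_combination dice_side total_dice_num dice_combo → Spec_count_combination dice_side total_dice_num dice_combo (count_combination dice_side total_dice_num dice_combo)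

-- ===== LEMMAS AND PROOFS =====

-- the common value of both denominators: product of factorial(multiplicity) over distinct values
def prodFactCount (s : List Int) : Int :=
  ((PySem.Set.ofList s).map (fun k => pyFactorial ((s.count k : Nat) : Int))).prod

theorem pyFactorial_nonneg_succ (c : Int) (h : 0 ≤ c) :
    pyFactorial (c + 1) = pyFactorial c * (c + 1) := by
  obtain ⟨n, rfl⟩ := Int.eq_ofNat_of_zero_le h
  simp [pyFactorial, Nat.factorial_succ]
  ring

theorem pyFactorial_pos (c : Int) : 0 < pyFactorial c := by
  unfold pyFactorial
  exact_mod_cast Nat.factorial_pos c.toNat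

theorem foldl_mul_eq {α : Type} (l : List α) (f : α → Int) (a : Int) :
    l.foldl (fun acc x => acc * f x) a = a * (l.map f).prod := by
  induction l generalizing a with
  | nil => simp
  | cons x t ih => simp [ih]; ring

-- replacing the value at one element of a nodup list inside a product
theorem prod_map_replace (S : List Int) (f g : Int → Int) (a : Int)
    (hnd : S.Nodup) (ha : a ∈ S) (hfg : ∀ k ∈ S, k ≠ a → f k = g k) :
    g a * (S.map f).prod = f a * (S.map g).prod := by
  induction S with
  | nil => cases ha
  | cons x t ih =>
    rcases List.mem_cons.mp ha with rfl | hat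
    · have : ∀ k ∈ t, f k = g k := fun k hk =>
        hfg k (List.mem_cons_of_mem _ hk) (fun h => (List.nodup_cons.mp hnd).1 (h ▸ hk))
      simp [List.map_congr_left this]
      ring
    · have hxa : x ≠ a := fun h => (List.nodup_cons.mp hnd).1 (h ▸ hat)
      have hx : f x = g x := hfg x (List.mem_cons_self) hxa
      have := ih (List.nodup_cons.mp hnd).2 hat
        (fun k hk hka => hfg k (List.mem_cons_of_mem _ hk) hka)
      simp only [List.map_cons, List.prod_cons, hx]
      calc g a * (g x * (t.map f).prod) = g x * (g a * (t.map f).prod) := by ring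
        _ = g x * (f a * (t.map g).prod) := by rw [this]
        _ = f a * (g x * (t.map g).prod) := by ring

theorem set_ofList_append_singleton (s : List Int) (a : Int) :
    PySem.Set.ofList (s ++ [a]) = PySem.Set.add (PySem.Set.ofList s) a := by
  simp [PySem.Set.ofList_eq_foldl, List.foldl_append]

theorem prodFactCount_append (s : List Int) (a : Int) :
    prodFactCount (s ++ [a]) = prodFactCount s * ((s.count a : Nat) + 1 : Int) := by
  have hcount : ∀ k : Int, ((s ++ [a]).count k : Nat) = s.count k + if a = k then 1 else 0 := by
    intro k
    simp [List.count_append, List.count_singleton, beq_iff_eq]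
  by_cases hmem : a ∈ s
  · have hS : PySem.Set.ofList (s ++ [a]) = PySem.Set.ofList s := by
      rw [set_ofList_append_singleton]
      simp [PySem.Set.add, PySem.Set.contains, PySem.Set.mem_ofList, hmem]
    have key := prod_map_replace (PySem.Set.ofList s)
      (fun k => pyFactorial (((s ++ [a]).count k : Nat) : Int))
      (fun k => pyFactorial ((s.count k : Nat) : Int)) a
      (PySem.Set.nodup_ofList s) ((PySem.Set.mem_ofList _ _).mpr hmem)
      (by intro k hk hka
          have hak : ¬ a = k := fun h => hka h.symm
          simp [hcount k, hak])
    simp only [] at key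
    have hfa : pyFactorial (((s ++ [a]).count a : Nat) : Int)
        = pyFactorial ((s.count a : Nat) : Int) * ((s.count a : Nat) + 1 : Int) := by
      have h1 : (s ++ [a]).count a = s.count a + 1 := by
        simp [List.count_append]
      rw [h1, show (((s.count a + 1 : Nat)) : Int) = ((s.count a : Nat) : Int) + 1 by push_cast; ring]
      exact pyFactorial_nonneg_succ _ (by positivity)
    unfold prodFactCount
    rw [hS]
    have hpos := pyFactorial_pos ((s.count a : Nat) : Int)
    apply Int.eq_of_mul_eq_mul_left (a := pyFactorial ((s.count a : Nat) : Int)) (by omega)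
    rw [key, hfa]
    ring
  · have hS : PySem.Set.ofList (s ++ [a]) = PySem.Set.ofList s ++ [a] := by
      rw [set_ofList_append_singleton]
      simp [PySem.Set.add, PySem.Set.contains, PySem.Set.mem_ofList, hmem]
    have hzero : s.count a = 0 := List.count_eq_zero.mpr hmem
    unfold prodFactCount
    rw [hS, List.map_append, List.prod_append]
    have hrest : (PySem.Set.ofList s).map (fun k => pyFactorial (((s ++ [a]).count k : Nat) : Int))
        = (PySem.Set.ofList s).map (fun k => pyFactorial ((s.count k : Nat) : Int)) := by
      apply List.map_congr_left
      intro k hk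
      have : a ≠ k := fun h => hmem ((PySem.Set.mem_ofList _ _).mp (h ▸ hk))
      simp [hcount k, this]
    rw [hrest]
    simp [hzero, pyFactorial]

-- B's loop invariant
theorem b_loop_inv (l : List Int) : ∀ (seen : List Int) (den : Int),
    den = prodFactCount seen →
    l.foldl (fun (st : List Int × Int) dice =>
        let seen := st.1 ++ [dice]
        (seen, st.2 * ((seen.count dice : Nat) : Int))) (seen, den)
      = (seen ++ l, prodFactCount (seen ++ l)) := by
  induction l with
  | nil => intro seen den h; simp [h]
  | cons x t ih =>
    intro seen den h
    have hc : (((seen ++ [x]).count x : Nat) : Int) = ((seen.count x : Nat) + 1 : Int) := by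
      simp [List.count_append]
    simp only [List.foldl_cons]
    rw [show (seen ++ x :: t) = (seen ++ [x]) ++ t by simp]
    exact ih (seen ++ [x]) _ (by rw [h, hc, prodFactCount_append])

-- A's counting loop is collections.Counter
theorem count_occurence_eq_counter (l : List Int) :
    count_occurence l = PySem.Dict.counter l := by
  unfold count_occurence
  rw [show (fun (occurence : PySem.Dict Int Int) (dice_value : Int) =>
        match occurence.get? dice_value with
        | some c => occurence.insert dice_value (c + 1)
        | none   => occurence.insert dice_value 1)
      = (fun (d : PySem.Dict Int Int) (x : Int) => d.insert x (d.getD x 0 + 1)) from ?_]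
  · exact PySem.Dict.foldl_insert_getD_add_one_eq_counter l
  · funext d x
    rcases h : d.get? x with _ | c <;>
      simp [PySem.Dict.getD_eq_get?_getD, h]

-- A's denominator equals prodFactCount
theorem a_denominator (l : List Int) :
    (count_occurence l).items.foldl (fun den kv => den * pyFactorial kv.2) 1
      = prodFactCount l := by
  rw [count_occurence_eq_counter, foldl_mul_eq, PySem.Dict.items_counter]
  unfold prodFactCount
  simp [List.map_map, Function.comp_def]

-- ===== VERDICT (by name: the statement is the Claim_ definition above) =====
theorem count_combination_spec : Claim_equal_count_combination := by
  intro dice_side total_dice_num dice_combo _ _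
  unfold Spec_count_combination count_combination count_combination_alt
  by_cases hg : dice_combo.any (fun dice => decide (dice_side < dice) || decide (dice < 0))
  · simp [hg]
  · simp only [hg, if_false, Bool.false_eq_true]
    rw [a_denominator, b_loop_inv dice_combo [] 1 (by simp [prodFactCount])]
    simp
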